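-- pv_equiv track=rewrite | github.com/R-1313/-22-9-- | Rasul PY/6.48.py | find_max_odd_digit_and_min_digit_index
-- ===== SOURCE A (Python) =====
-- def find_max_odd_digit_and_min_digit_index(number):
--
--     if not isinstance(number, int):
--         raise TypeError("Аргумент должен быть целым числом.")
--
--     if number <= 0:
--         raise ValueError("Аргумент должен быть натуральным числом (больше 0).")
--
--     number_str = str(number)
--     max_odd_digit = None
--     min_digit = int(number_str[0])
--     min_digit_index = 1
--
--     for i, digit_char in enumerate(number_str):
--         digit = int(digit_char)
--         index = i + 1
--
--         if digit % 2 != 0: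
--             if max_odd_digit is None or digit > max_odd_digit:
--                 max_odd_digit = digit
--
--         if digit < min_digit:
--             min_digit = digit
--             min_digit_index = index
--
--     return max_odd_digit, min_digit_index
-- ===== SOURCE B (Python) =====
-- def find_max_odd_digit_and_min_digit_index(number):
--
--     if not isinstance(number, int):
--         raise TypeError("Аргумент должен быть целым числом.")
--
--     if number <= 0:
--         raise ValueError("Аргумент должен быть натуральным числом (больше 0).")
--
--     # Arithmetic digit extraction, right-to-left: no string conversion at all.
--     max_odd_digit = None
--     min_digit = 10
--     min_pos_from_right = 0
--     length = 0
--     n = number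
--     while n > 0:
--         d = n % 10
--         n //= 10
--         length += 1
--         if d % 2 == 1 and (max_odd_digit is None or d > max_odd_digit):
--             max_odd_digit = d
--         if d <= min_digit:  # '<=' keeps the LAST hit, i.e. the leftmost minimum
--             min_digit = d
--             min_pos_from_right = length
--     return max_odd_digit, length - min_pos_from_right + 1
-- ===== Notes on version B (the rewrite author's own statement) =====
-- stated objective: alternative
-- what changed: Replaces A's left-to-right loop over str(number) (tracking the max odd digit and the first-minimum index) with pure arithmetic digit extraction: a while-loop repeatedly taking the remainder and floor-dividing by ten scans the digits right-to-left, keeps the minimum with a non-strict comparison so the last hit is the leftmost minimum, and converts its position from the right into the position from the left; no string is built.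
import Mathlib
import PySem

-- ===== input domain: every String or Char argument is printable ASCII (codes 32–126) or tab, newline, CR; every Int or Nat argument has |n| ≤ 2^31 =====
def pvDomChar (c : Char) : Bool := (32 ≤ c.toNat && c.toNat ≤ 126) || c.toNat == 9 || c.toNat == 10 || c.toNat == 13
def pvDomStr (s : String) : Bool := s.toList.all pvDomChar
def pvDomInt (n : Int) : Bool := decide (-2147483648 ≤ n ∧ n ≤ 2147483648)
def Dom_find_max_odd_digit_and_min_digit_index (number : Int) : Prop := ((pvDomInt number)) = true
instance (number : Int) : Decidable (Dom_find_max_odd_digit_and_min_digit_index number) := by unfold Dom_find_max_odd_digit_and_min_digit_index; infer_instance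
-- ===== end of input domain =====

-- B replaces A's left-to-right scan over str(number) by pure arithmetic digit extraction (mod/floor-division by ten),
-- scanning the digits right-to-left with a '<=' min update; no string is built. Same cost, alternative algorithm.


-- ===== PORT A =====
-- int(c) for a one-character string; the `.getD 0` default is never reached under Pre_ (str(number) yields only digit chars)
def pyIntChar (c : Char) : Int := (PySem.Int.ofChars? [c]).getD 0

-- one iteration of A's `for i, digit_char in enumerate(number_str)` loop, state = (max_odd_digit, min_digit, min_digit_index)
def fmaStep (st : Option Int × Int × Int) (p : Int × Char) : Option Int × Int × Int :=
  let digit := pyIntChar p.2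
  let index := p.1 + 1
  let max_odd :=
    if PySem.Int.mod digit 2 ≠ 0 then
      match st.1 with
      | none => some digit
      | some m => if digit > m then some digit else some m
    else st.1
  if digit < st.2.1 then (max_odd, digit, index) else (max_odd, st.2.1, st.2.2)

def find_max_odd_digit_and_min_digit_index (number : Int) : Option Int × Int :=
  let number_str := PySem.Int.toChars number
  -- int(number_str[0]); index 0 is in range under Pre_ (number > 0, so str(number) is nonempty)
  let min_digit0 := pyIntChar (PySem.List.pyGetD number_str 0 '0')
  let st := (PySem.List.enumerate number_str 0).foldl fmaStep (none, min_digit0, 1)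
  (st.1, st.2.2)

-- ===== PORT B =====
-- B's `while n > 0` loop; state = (max_odd_digit, min_digit, min_pos_from_right, length)
def bLoop (n : Int) (mo : Option Int) (md pos len : Int) : Option Int × Int × Int × Int :=
  if h : 0 < n then
    let d := PySem.Int.mod n 10
    let len' := len + 1
    let mo' :=
      if PySem.Int.mod d 2 = 1 then
        match mo with
        | none => some d
        | some m => if d > m then some d else mo
      else mo
    let st := if d ≤ md then (d, len') else (md, pos)
    bLoop (PySem.Int.floordiv n 10) mo' st.1 st.2 len'
  else (mo, md, pos, len)
termination_by n.toNat
decreasing_by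
  have h10 : PySem.Int.floordiv n 10 = n / 10 := PySem.Int.floordiv_eq_ediv_of_pos (by norm_num)
  rw [h10]
  omega

def find_max_odd_digit_and_min_digit_index_alt (number : Int) : Option Int × Int :=
  let r := bLoop number none 10 0 0
  (r.1, r.2.2.2 - r.2.2.1 + 1)

-- ===== PRECONDITION & SPEC =====
-- Pre_ excludes exactly the inputs on which A raises (ValueError for number <= 0; TypeError is impossible for an Int argument)
def Pre_find_max_odd_digit_and_min_digit_index (number : Int) : Prop := 0 < number
instance (number : Int) : Decidable (Pre_find_max_odd_digit_and_min_digit_index number) := by unfold Pre_find_max_odd_digit_and_min_digit_index; infer_instance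
def pvWitness_find_max_odd_digit_and_min_digit_index : Int := 907

def Spec_find_max_odd_digit_and_min_digit_index (number : Int) (out : Option Int × Int) : Prop := out = find_max_odd_digit_and_min_digit_index_alt number
instance (number : Int) (out : Option Int × Int) : Decidable (Spec_find_max_odd_digit_and_min_digit_index number out) := by unfold Spec_find_max_odd_digit_and_min_digit_index; infer_instance

-- ===== CLAIM (what is proved, stated in full; the proofs are below) =====
def Claim_equal_find_max_odd_digit_and_min_digit_index : Prop := ∀ (number : Int), Dom_find_max_odd_digit_and_min_digit_index number → Pre_find_max_odd_digit_and_min_digit_index number → Spec_find_max_odd_digit_and_min_digit_index number (find_max_odd_digit_and_min_digit_index number)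

-- ===== LEMMAS AND PROOFS =====

-- the decimal digits of a natural number, most significant first, as Ints
def natDigits (n : Nat) : List Int :=
  if h : n = 0 then [] else natDigits (n / 10) ++ [((n % 10 : Nat) : Int)]
termination_by n
decreasing_by exact Nat.div_lt_self (Nat.pos_of_ne_zero h) (by norm_num)

theorem natDigits_zero : natDigits 0 = [] := by rw [natDigits]; simp

theorem natDigits_pos (n : Nat) (h : 0 < n) :
    natDigits n = natDigits (n / 10) ++ [((n % 10 : Nat) : Int)] := by
  rw [natDigits]; simp [Nat.pos_iff_ne_zero.mp h]

theorem natDigits_ne_nil (n : Nat) (h : 0 < n) : natDigits n ≠ [] := by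
  rw [natDigits_pos n h]; simp

theorem natDigits_bounds (n : Nat) : ∀ d ∈ natDigits n, 0 ≤ d ∧ d ≤ 9 := by
  induction n using Nat.strong_induction_on with
  | _ n ih =>
    intro d hd
    by_cases h : n = 0
    · subst h; rw [natDigits_zero] at hd; simp at hd
    · rw [natDigits_pos n (Nat.pos_of_ne_zero h)] at hd
      rcases List.mem_append.mp hd with hm | hm
      · exact ih (n / 10) (Nat.div_lt_self (Nat.pos_of_ne_zero h) (by norm_num)) d hm
      · have : d = ((n % 10 : Nat) : Int) := by simpa using hm
        subst this
        have := Nat.mod_lt n (show 0 < 10 by norm_num)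
        omega

theorem pyIntChar_digitChar (m : Nat) (h : m < 10) : pyIntChar (Nat.digitChar m) = (m : Int) := by
  interval_cases m <;> decide

theorem toDigitsCore_map (fuel : Nat) : ∀ (n : Nat) (ds : List Char), n < fuel → 0 < n →
    (Nat.toDigitsCore 10 fuel n ds).map pyIntChar = natDigits n ++ ds.map pyIntChar := by
  induction fuel with
  | zero => intro n ds h; omega
  | succ f ih =>
    intro n ds hlt hpos
    rw [Nat.toDigitsCore]
    by_cases h10 : n / 10 = 0
    · rw [if_pos h10, natDigits_pos n hpos, h10, natDigits_zero]
      simp [pyIntChar_digitChar _ (Nat.mod_lt n (by norm_num))]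
    · rw [if_neg h10]
      have hq : n / 10 < f := by
        have := Nat.div_lt_self hpos (show 1 < 10 by norm_num); omega
      rw [ih (n / 10) _ hq (Nat.pos_of_ne_zero h10), natDigits_pos n hpos]
      simp [pyIntChar_digitChar _ (Nat.mod_lt n (by norm_num))]

theorem toChars_map (n : Int) (h : 0 < n) :
    (PySem.Int.toChars n).map pyIntChar = natDigits n.toNat := by
  have h0 : ¬ n < 0 := by omega
  have hpos : 0 < n.toNat := by omega
  simp only [PySem.Int.toChars, if_neg h0, Nat.toDigits]
  rw [toDigitsCore_map (n.toNat + 1) n.toNat [] (by omega) hpos]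
  simp

-- ---- A's loop, detached from the characters: the same scans over the digit values ----

def oddA (mo : Option Int) : List Int → Option Int
  | [] => mo
  | d :: t =>
    oddA (if PySem.Int.mod d 2 ≠ 0 then
            match mo with
            | none => some d
            | some m => if d > m then some d else some m
          else mo) t

def minA : List Int → Int → Int × Int → Int × Int
  | [], _, st => st
  | d :: t, s, st => minA t (s + 1) (if d < st.1 then (d, s + 1) else st)

theorem fold_eq (cs : List Char) (s : Int) (mo : Option Int) (st : Int × Int) :
    (PySem.List.enumerate cs s).foldl fmaStep (mo, st) =
      (oddA mo (cs.map pyIntChar), minA (cs.map pyIntChar) s st) := by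
  induction cs generalizing s mo st with
  | nil => simp [PySem.List.enumerate_nil, oddA, minA]
  | cons c t ih =>
    rw [PySem.List.enumerate_cons, List.foldl_cons]
    have hstep : fmaStep (mo, st) (s, c) =
        ((if PySem.Int.mod (pyIntChar c) 2 ≠ 0 then
            match mo with
            | none => some (pyIntChar c)
            | some m => if pyIntChar c > m then some (pyIntChar c) else some m
          else mo),
          (if pyIntChar c < st.1 then (pyIntChar c, s + 1) else st)) := by
      simp only [fmaStep]
      by_cases h : pyIntChar c < st.1 <;> simp [h]
    rw [hstep, ih]
    rfl

-- ---- B's loop, detached from the arithmetic: the same scans over the reversed digit list ----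

def oddB (mo : Option Int) : List Int → Option Int
  | [] => mo
  | d :: t =>
    oddB (if PySem.Int.mod d 2 = 1 then
            match mo with
            | none => some d
            | some m => if d > m then some d else mo
          else mo) t

def minB : List Int → Int → Int × Int → Int × Int × Int
  | [], len, st => (st.1, st.2, len)
  | d :: t, len, st => minB t (len + 1) (if d ≤ st.1 then (d, len + 1) else st)

theorem bLoop_eq_nat (m : Nat) : ∀ (mo : Option Int) (md pos len : Int),
    bLoop (m : Int) mo md pos len =
      ((oddB mo (natDigits m).reverse),
        minB (natDigits m).reverse len (md, pos)) := by
  induction m using Nat.strong_induction_on with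
  | _ m ih =>
    intro mo md pos len
    rw [bLoop]
    by_cases h : 0 < (m : Int)
    · rw [dif_pos h]
      have hm : 0 < m := by exact_mod_cast h
      have hmod : PySem.Int.mod (m : Int) 10 = ((m % 10 : Nat) : Int) := by
        exact_mod_cast PySem.Int.mod_natCast m 10
      have hdiv : PySem.Int.floordiv (m : Int) 10 = ((m / 10 : Nat) : Int) := by
        exact_mod_cast PySem.Int.floordiv_natCast m 10
      simp only [hmod, hdiv]
      rw [ih (m / 10) (Nat.div_lt_self hm (by norm_num))]
      rw [natDigits_pos m hm, List.reverse_append]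
      simp only [List.reverse_singleton, List.singleton_append, oddB, minB]
    · have hm : m = 0 := by omega
      rw [dif_neg h, hm, natDigits_zero]
      simp [oddB, minB]

theorem bLoop_eq (n : Int) (h : 0 ≤ n) (mo : Option Int) (md pos len : Int) :
    bLoop n mo md pos len =
      ((oddB mo (natDigits n.toNat).reverse),
        minB (natDigits n.toNat).reverse len (md, pos)) := by
  have : n = (n.toNat : Int) := by omega
  rw [this, bLoop_eq_nat, Int.toNat_natCast]

-- ---- characterisations of the four scans ----

theorem oddA_some (L : List Int) (m : Int) :
    oddA (some m) L = some (((L.filter (fun d => decide (PySem.Int.mod d 2 ≠ 0)))).foldl max m) := by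
  induction L generalizing m with
  | nil => simp [oddA]
  | cons d t ih =>
    rw [oddA]
    by_cases h : PySem.Int.mod d 2 ≠ 0
    · rw [if_pos h]
      have hmax : (if d > m then some d else some m) = some (max m d) := by
        rcases le_or_gt d m with h' | h'
        · rw [if_neg (not_lt.mpr h'), max_eq_left h']
        · rw [if_pos h', max_eq_right h'.le]
      rw [hmax, ih, List.filter_cons_of_pos (by simpa using h)]
      rfl
    · rw [if_neg h, ih, List.filter_cons_of_neg (by simpa using h)]

theorem oddA_none (L : List Int) :
    oddA none L = (L.filter (fun d => decide (PySem.Int.mod d 2 ≠ 0))).max? := by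
  induction L with
  | nil => simp [oddA]
  | cons d t ih =>
    rw [oddA]
    by_cases h : PySem.Int.mod d 2 ≠ 0
    · rw [if_pos h, oddA_some]
      rw [List.filter_cons_of_pos (by simpa using h), List.max?_cons']
    · rw [if_neg h, ih, List.filter_cons_of_neg (by simpa using h)]

theorem oddB_some (L : List Int) (m : Int) :
    oddB (some m) L = some (((L.filter (fun d => decide (PySem.Int.mod d 2 = 1)))).foldl max m) := by
  induction L generalizing m with
  | nil => simp [oddB]
  | cons d t ih =>
    rw [oddB]
    by_cases h : PySem.Int.mod d 2 = 1
    · rw [if_pos h]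
      have hmax : (if d > m then some d else some m) = some (max m d) := by
        rcases le_or_gt d m with h' | h'
        · rw [if_neg (not_lt.mpr h'), max_eq_left h']
        · rw [if_pos h', max_eq_right h'.le]
      rw [hmax, ih, List.filter_cons_of_pos (by simpa using h)]
      rfl
    · rw [if_neg h, ih, List.filter_cons_of_neg (by simpa using h)]

theorem oddB_none (L : List Int) :
    oddB none L = (L.filter (fun d => decide (PySem.Int.mod d 2 = 1))).max? := by
  induction L with
  | nil => simp [oddB]
  | cons d t ih =>
    rw [oddB]
    by_cases h : PySem.Int.mod d 2 = 1
    · rw [if_pos h, oddB_some]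
      rw [List.filter_cons_of_pos (by simpa using h), List.max?_cons']
    · rw [if_neg h, ih, List.filter_cons_of_neg (by simpa using h)]

theorem max?_reverse (l : List Int) : l.reverse.max? = l.max? := by
  rcases h : l.max? with _ | a
  · rw [List.max?_eq_none_iff] at h
    simp [h]
  · rw [List.max?_eq_some_iff] at h ⊢
    simpa using h

-- foldl min lemmas
theorem foldlMin_le (cs : List Int) (a : Int) : cs.foldl min a ≤ a := by
  induction cs generalizing a with
  | nil => simp
  | cons c t ih => exact le_trans (ih (min a c)) (min_le_left a c)

theorem foldlMin_mem (cs : List Int) (a : Int) :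
    cs.foldl min a = a ∨ cs.foldl min a ∈ cs := by
  induction cs generalizing a with
  | nil => simp
  | cons c t ih =>
    rcases ih (min a c) with h | h
    · rcases min_choice a c with h' | h'
      · left; rw [List.foldl_cons, h, h']
      · right; rw [List.foldl_cons, h, h']; exact List.mem_cons_self ..
    · right; rw [List.foldl_cons]; exact List.mem_cons_of_mem _ h

theorem foldlMin_le_mem (cs : List Int) (a : Int) : ∀ b ∈ cs, cs.foldl min a ≤ b := by
  induction cs generalizing a with
  | nil => simp
  | cons c t ih =>
    intro b hb
    rcases List.mem_cons.mp hb with he | hm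
    · subst he
      exact le_trans (foldlMin_le t (min a b)) (min_le_right a b)
    · exact ih (min a c) b hm

theorem foldlMin_of_forall_gt (cs : List Int) (a : Int) (h : ∀ b ∈ cs, ¬ b ≤ a) :
    cs.foldl min a = a := by
  induction cs generalizing a with
  | nil => simp
  | cons c t ih =>
    rw [List.foldl_cons, min_eq_left (not_le.mp (h c (List.mem_cons_self ..))).le]
    exact ih a (fun b hb => h b (List.mem_cons_of_mem _ hb))

-- A's min scan: minimum of the list and FIRST index of that minimum
theorem minA_spec (L : List Int) (s : Int) (m mi : Int) :
    minA L s (m, mi) =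
      (L.foldl min m,
        if L.foldl min m < m then s + ((PySem.List.index? L (L.foldl min m)).getD 0 : Nat) + 1 else mi) := by
  induction L generalizing s m mi with
  | nil => simp [minA]
  | cons c t ih =>
    rw [minA]
    by_cases h : c < m
    · rw [if_pos h, ih (s + 1) c (s + 1), List.foldl_cons, min_eq_right h.le]
      have hKc : t.foldl min c ≤ c := foldlMin_le t c
      rw [if_pos (lt_of_le_of_lt hKc h)]
      by_cases hd : t.foldl min c < c
      · have hne : c ≠ t.foldl min c := ne_of_gt hd
        have hmem : t.foldl min c ∈ t := by
          rcases foldlMin_mem t c with he | hm'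
          · exact absurd hd (by rw [he]; exact lt_irrefl c)
          · exact hm'
        obtain ⟨j, hj⟩ := Option.isSome_iff_exists.mp ((PySem.List.index?_isSome_iff t _).mpr hmem)
        rw [if_pos hd, PySem.List.index?_cons_of_ne t hne, hj]
        simp only [Option.map_some, Option.getD_some, Prod.mk.injEq]
        exact ⟨trivial, by push_cast; ring⟩
      · have hKc' : t.foldl min c = c := le_antisymm hKc (not_lt.mp hd)
        rw [if_neg hd, hKc', PySem.List.index?_cons_self]
        simp only [Option.getD_some, Nat.cast_zero, Prod.mk.injEq]
        exact ⟨trivial, by ring⟩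
    · rw [if_neg h, ih (s + 1) m mi, List.foldl_cons, min_eq_left (not_lt.mp h)]
      by_cases hKm : t.foldl min m < m
      · have hne : c ≠ t.foldl min m := ne_of_gt (lt_of_lt_of_le hKm (not_lt.mp h))
        have hmem : t.foldl min m ∈ t := by
          rcases foldlMin_mem t m with he | hm'
          · exact absurd hKm (by rw [he]; exact lt_irrefl m)
          · exact hm'
        obtain ⟨j, hj⟩ := Option.isSome_iff_exists.mp ((PySem.List.index?_isSome_iff t _).mpr hmem)
        rw [if_pos hKm, if_pos hKm, PySem.List.index?_cons_of_ne t hne, hj]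
        simp only [Option.map_some, Option.getD_some, Prod.mk.injEq]
        exact ⟨trivial, by push_cast; ring⟩
      · rw [if_neg hKm, if_neg hKm]

-- unfolding minB over an appended last element
theorem minB_append (t : List Int) (d : Int) (len : Int) (st : Int × Int) :
    minB (t ++ [d]) len st =
      (let r := minB t len st
       (if d ≤ r.1 then ((d : Int), r.2.2 + 1, r.2.2 + 1) else (r.1, r.2.1, r.2.2 + 1))) := by
  induction t generalizing len st with
  | nil =>
    simp only [List.nil_append, minB]
    by_cases h : d ≤ st.1 <;> simp [h]
  | cons c s ih =>
    simp only [List.cons_append, minB]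
    rw [ih]

-- B's min scan: minimum, and the position (counted from the start of the scan) of its LAST occurrence
theorem minB_spec (ds : List Int) (len md pos : Int) :
    minB ds len (md, pos) =
      (ds.foldl min md,
        (if ∃ d ∈ ds, d ≤ md then
            len + ((ds.length : Int) - ((PySem.List.index? ds.reverse (ds.foldl min md)).getD 0 : Nat))
          else pos),
        len + (ds.length : Int)) := by
  induction ds using List.reverseRecOn with
  | nil => simp [minB]
  | append_singleton t d ih =>
    rw [minB_append, ih]
    simp only [List.foldl_append, List.foldl_cons, List.foldl_nil, List.reverse_append,
      List.reverse_singleton, List.singleton_append, List.length_append, List.length_singleton]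
    by_cases hd : d ≤ t.foldl min md
    · rw [if_pos hd]
      have hdm : d ≤ md := le_trans hd (foldlMin_le t md)
      rw [if_pos ⟨d, by simp, hdm⟩, min_eq_right hd, PySem.List.index?_cons_self]
      simp only [Option.getD_some, Nat.cast_zero, Prod.mk.injEq]
      exact ⟨by trivial, by push_cast; ring, by push_cast; ring⟩
    · rw [if_neg hd]
      have hmin : min (t.foldl min md) d = t.foldl min md :=
        min_eq_left (not_le.mp hd).le
      rw [hmin]
      have hcond : (∃ x ∈ t ++ [d], x ≤ md) ↔ (∃ x ∈ t, x ≤ md) := by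
        constructor
        · rintro ⟨x, hx, hle⟩
          rcases List.mem_append.mp hx with hx' | hx'
          · exact ⟨x, hx', hle⟩
          · have hxd : x = d := by simpa using hx'
            subst hxd
            by_contra hno
            have : t.foldl min md = md := foldlMin_of_forall_gt t md (fun b hb hle => hno ⟨b, hb, hle⟩)
            rw [this] at hd
            exact hd hle
        · rintro ⟨x, hx, hle⟩; exact ⟨x, List.mem_append_left _ hx, hle⟩
      by_cases hc : ∃ x ∈ t, x ≤ md
      · rw [if_pos (hcond.mpr hc), if_pos hc]
        have hmem : t.foldl min md ∈ t := by
          obtain ⟨x, hx, hle⟩ := hc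
          rcases foldlMin_mem t md with he | hm'
          · have hle2 := foldlMin_le_mem t md x hx
            rw [he] at hle2
            have hxmd : x = md := le_antisymm hle hle2
            rw [he, ← hxmd]
            exact hx
          · exact hm'
        have hne : d ≠ t.foldl min md := fun he => hd (le_of_eq he)
        have hmemr : t.foldl min md ∈ t.reverse := by simpa using hmem
        obtain ⟨j, hj⟩ := Option.isSome_iff_exists.mp ((PySem.List.index?_isSome_iff t.reverse _).mpr hmemr)
        rw [PySem.List.index?_cons_of_ne t.reverse hne, hj]
        simp only [Option.map_some, Option.getD_some, Prod.mk.injEq]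
        exact ⟨by trivial, by push_cast; ring, by push_cast; ring⟩
      · rw [if_neg (fun hx => hc (hcond.mp hx)), if_neg hc]
        simp only [Prod.mk.injEq]
        exact ⟨by trivial, by trivial, by push_cast; ring⟩

-- the two odd-digit filters agree on digit values (0 ≤ d)
theorem filter_odd_congr (L : List Int) (hb : ∀ d ∈ L, 0 ≤ d ∧ d ≤ 9) :
    L.filter (fun d => decide (PySem.Int.mod d 2 ≠ 0)) =
      L.filter (fun d => decide (PySem.Int.mod d 2 = 1)) := by
  refine List.filter_congr ?_
  intro x hx
  have h0 := (hb x hx).1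
  have hm : PySem.Int.mod x 2 = x % 2 := PySem.Int.mod_eq_emod_of_pos (by norm_num)
  have h2a : 0 ≤ x % 2 := Int.emod_nonneg x (by norm_num)
  have h2b : x % 2 < 2 := Int.emod_lt_of_pos x (by norm_num)
  rw [hm]
  rcases (by omega : x % 2 = 0 ∨ x % 2 = 1) with h | h <;> simp [h]

-- ===== VERDICT (by name: the statement is the Claim_ definition above) =====
theorem find_max_odd_digit_and_min_digit_index_spec : Claim_equal_find_max_odd_digit_and_min_digit_index := by
  intro number hdom hpre
  have hpos : 0 < number := hpre
  have hL := toChars_map number hpos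
  have hbnd := natDigits_bounds number.toNat
  have hne : natDigits number.toNat ≠ [] := natDigits_ne_nil _ (by omega)
  obtain ⟨L0, Lt, hLL⟩ := List.exists_cons_of_ne_nil hne
  have hcs : PySem.Int.toChars number ≠ [] := by
    intro h
    rw [h] at hL
    exact hne (by rw [← hL]; rfl)
  obtain ⟨c0, ct, hcc⟩ := List.exists_cons_of_ne_nil hcs
  have hmapcc : (c0 :: ct).map pyIntChar = L0 :: Lt := by rw [← hcc, hL, hLL]
  have hc0 : pyIntChar c0 = L0 := by
    have := congrArg (fun l => l.headD 0) hmapcc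
    simpa using this
  rw [hLL] at hbnd
  have hL0le : L0 ≤ 9 := (hbnd L0 (List.mem_cons_self ..)).2
  show _ = _
  simp only [find_max_odd_digit_and_min_digit_index, find_max_odd_digit_and_min_digit_index_alt]
  rw [hcc, PySem.List.pyGetD_zero_cons, hc0, fold_eq, hmapcc]
  rw [bLoop_eq number (le_of_lt hpos), hLL, minB_spec]
  have hcond : ∃ d ∈ (L0 :: Lt).reverse, d ≤ (10 : Int) := by
    exact ⟨L0, List.mem_reverse.mpr (List.mem_cons_self ..), by omega⟩
  rw [if_pos hcond]
  -- the two minima coincide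
  have hKmem : (L0 :: Lt).foldl min L0 ∈ L0 :: Lt := by
    rcases foldlMin_mem (L0 :: Lt) L0 with h | h
    · rw [h]; exact List.mem_cons_self ..
    · exact h
  have hm1mem : (L0 :: Lt).reverse.foldl min 10 ∈ L0 :: Lt := by
    rcases foldlMin_mem ((L0 :: Lt).reverse) 10 with h | h
    · exfalso
      have hle := foldlMin_le_mem ((L0 :: Lt).reverse) 10 L0 (List.mem_reverse.mpr (List.mem_cons_self ..))
      rw [h] at hle
      omega
    · exact List.mem_reverse.mp h
  have hm1K : (L0 :: Lt).reverse.foldl min 10 = (L0 :: Lt).foldl min L0 := by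
    refine le_antisymm ?_ ?_
    · exact foldlMin_le_mem _ 10 _ (List.mem_reverse.mpr hKmem)
    · exact foldlMin_le_mem _ L0 _ hm1mem
  rw [minA_spec, hm1K, List.reverse_reverse, List.length_reverse]
  have hodd : oddA none (L0 :: Lt) = oddB none (L0 :: Lt).reverse := by
    rw [oddA_none, oddB_none, List.filter_reverse, max?_reverse, filter_odd_congr _ hbnd]
  refine Prod.ext ?_ ?_ <;> dsimp only
  · exact hodd
  · by_cases hKlt : (L0 :: Lt).foldl min L0 < L0
    · rw [if_pos hKlt]
      push_cast
      ring
    · rw [if_neg hKlt]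
      have hK : (L0 :: Lt).foldl min L0 = L0 :=
        le_antisymm (foldlMin_le _ _) (not_lt.mp hKlt)
      rw [hK, PySem.List.index?_cons_self]
      simp
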